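-- pv_equiv track=rewrite | github.com/Polloinfilzato/dm20-protocol | src/dm20_protocol/output_filter.py | _strip_dm_notes_section
-- ===== SOURCE A (Python) =====
-- def _strip_dm_notes_section(text: str) -> str:
--     """Remove DM notes from a text block.
--
--     Looks for lines containing '**Notes:**' or '**DM Notes:**' and strips
--     that line and any following content until the next section header
--     (any line starting with '**' that is a different field).
--
--     Args:
--         text: The raw response text.
--
--     Returns:
--         The text with DM notes sections removed.
--     """
--     lines = text.split("\n")
--     result_lines: list[str] = []
--     skip = False
--
--     for line in lines:
--         stripped = line.strip().lower()
--         if stripped.startswith("**notes:**") or stripped.startswith("**dm notes:**"):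
--             skip = True
--             continue
--         # Stop skipping at the next section header (any bold-prefixed field)
--         if skip and stripped.startswith("**") and ":**" in stripped:
--             skip = False
--         if not skip:
--             result_lines.append(line)
--
--     return "\n".join(result_lines)
-- ===== SOURCE B (Python) =====
-- def _is_header(line: str) -> bool:
--     s = line.strip().lower()
--     return s.startswith("**") and ":**" in s
--
--
-- def _is_notes_header(line: str) -> bool:
--     s = line.strip().lower()
--     return s.startswith("**notes:**") or s.startswith("**dm notes:**")
--
--
-- def _strip_dm_notes_section(text: str) -> str:
--     # Pass 1: split the lines into sections: a preamble of lines before any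
--     # header, then one section per header line (header + following non-headers).
--     sections: list[list[str]] = [[]]
--     for line in text.split("\n"):
--         if _is_header(line):
--             sections.append([line])
--         else:
--             sections[-1].append(line)
--     # Pass 2: emit every section that is not headed by a notes header.
--     kept: list[str] = []
--     for sec in sections:
--         if sec and _is_notes_header(sec[0]):
--             continue
--         kept.extend(sec)
--     return "\n".join(kept)
-- ===== Notes on version B (the rewrite author's own statement) =====
-- stated objective: alternative
-- what changed: Replaces the running skip-flag line filter with a two-pass section decomposition: group lines into header-led sections, then drop whole sections headed by a notes header.
import Mathlib
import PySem

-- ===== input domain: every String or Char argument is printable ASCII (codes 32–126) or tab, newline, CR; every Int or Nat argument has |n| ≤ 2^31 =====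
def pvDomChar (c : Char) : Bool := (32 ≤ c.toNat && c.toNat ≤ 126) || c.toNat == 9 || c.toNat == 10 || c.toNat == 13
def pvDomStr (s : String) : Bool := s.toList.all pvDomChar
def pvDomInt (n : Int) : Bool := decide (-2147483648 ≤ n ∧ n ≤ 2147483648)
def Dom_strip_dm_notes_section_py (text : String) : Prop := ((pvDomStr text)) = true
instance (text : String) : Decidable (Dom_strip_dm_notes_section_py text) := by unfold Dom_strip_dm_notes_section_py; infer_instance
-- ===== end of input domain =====

-- B replaces A's running skip-flag filter with a two-pass section decomposition (group lines into header-led sections, then drop notes-headed sections); same O(n) cost, alternative structure.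


-- ===== PORT A =====
-- A's loop: running (result_lines, skip) state over the lines.
def pvALoop : List String → List String → Bool → List String
  | [], res, _ => res
  | line :: ls, res, skip =>
    let stripped := PySem.Str.lower (PySem.Str.strip line)
    if PySem.Str.startswith stripped "**notes:**" || PySem.Str.startswith stripped "**dm notes:**" then
      pvALoop ls res true
    else
      let skip1 := if skip && (PySem.Str.startswith stripped "**" && PySem.Str.isIn ":**" stripped) then false else skip
      pvALoop ls (if skip1 then res else res ++ [line]) skip1

def strip_dm_notes_section_py (text : String) : String :=
  PySem.Str.join "\n" (pvALoop ((PySem.Str.split? text "\n").getD []) [] false)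

-- ===== PORT B =====
def pvIsHeader (line : String) : Bool :=
  let s := PySem.Str.lower (PySem.Str.strip line)
  PySem.Str.startswith s "**" && PySem.Str.isIn ":**" s

def pvIsNotes (line : String) : Bool :=
  let s := PySem.Str.lower (PySem.Str.strip line)
  PySem.Str.startswith s "**notes:**" || PySem.Str.startswith s "**dm notes:**"

-- pass 1: group the lines into sections; `cur` is the open last section.
def pvGroup : List String → List String → List (List String)
  | [], cur => [cur]
  | l :: ls, cur => if pvIsHeader l then cur :: pvGroup ls [l] else pvGroup ls (cur ++ [l])

def strip_dm_notes_section_py_alt (text : String) : String :=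
  let sections := pvGroup ((PySem.Str.split? text "\n").getD []) []
  -- pass 2: keep every section not headed by a notes header.
  let kept := sections.foldl (fun acc sec =>
    match sec with
    | [] => acc ++ sec
    | h :: _ => if pvIsNotes h then acc else acc ++ sec) []
  PySem.Str.join "\n" kept

-- ===== PRECONDITION & SPEC =====
def Spec_strip_dm_notes_section_py (text : String) (out : String) : Prop := out = strip_dm_notes_section_py_alt text
instance (text : String) (out : String) : Decidable (Spec_strip_dm_notes_section_py text out) := by unfold Spec_strip_dm_notes_section_py; infer_instance

-- ===== CLAIM (what is proved, stated in full; the proofs are below) =====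
def Claim_equal_strip_dm_notes_section_py : Prop := ∀ (text : String), Dom_strip_dm_notes_section_py text → Spec_strip_dm_notes_section_py text (strip_dm_notes_section_py text)

-- ===== LEMMAS AND PROOFS =====

-- does a section start with a notes header?
def pvNotesHead : List String → Bool
  | [] => false
  | h :: _ => pvIsNotes h

-- recursive form of B's second pass
def pvFl : List (List String) → List String
  | [] => []
  | s :: gs => (if pvNotesHead s then [] else s) ++ pvFl gs

lemma pvFoldl_fl (gs : List (List String)) (acc : List String) :
    gs.foldl (fun acc sec =>
      match sec with
      | [] => acc ++ sec
      | h :: _ => if pvIsNotes h then acc else acc ++ sec) acc = acc ++ pvFl gs := by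
  induction gs generalizing acc with
  | nil => simp [pvFl]
  | cons s gs ih =>
    cases s with
    | nil => simp [List.foldl, ih, pvFl, pvNotesHead]
    | cons h rest =>
      simp only [List.foldl, pvFl, pvNotesHead]
      by_cases hn : pvIsNotes h = true <;> simp [hn, ih]

lemma pvNotes_imp_header (l : String) (h : pvIsNotes l = true) : pvIsHeader l = true := by
  simp only [pvIsNotes, Bool.or_eq_true, PySem.Str.startswith_eq, PySem.Chars.startswith_iff] at h
  simp only [pvIsHeader, Bool.and_eq_true, PySem.Str.startswith_eq, PySem.Chars.startswith_iff,
    PySem.Str.isIn_iff_infix]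
  rcases h with h | h
  · exact ⟨(show "**".toList <+: "**notes:**".toList by decide).trans h,
      ((show ":**".toList <:+: "**notes:**".toList by decide).trans h.isInfix)⟩
  · exact ⟨(show "**".toList <+: "**dm notes:**".toList by decide).trans h,
      ((show ":**".toList <:+: "**dm notes:**".toList by decide).trans h.isInfix)⟩

lemma pvGroup_shift (ls : List String) : ∀ cur,
    pvGroup ls cur = (cur ++ (pvGroup ls []).headI) :: (pvGroup ls []).tail := by
  induction ls with
  | nil => intro cur; simp [pvGroup]
  | cons l ls ih =>
    intro cur
    by_cases hh : pvIsHeader l = true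
    · simp [pvGroup, hh]
    · simp only [pvGroup, hh, Bool.false_eq_true, if_false, List.nil_append]
      rw [ih (cur ++ [l]), ih [l]]
      simp [List.append_assoc]

lemma pvGroup_first_not_notes (ls : List String) : ∀ cur, pvNotesHead cur = false →
    pvNotesHead ((pvGroup ls cur).headI) = false := by
  induction ls with
  | nil => intro cur hc; simpa [pvGroup] using hc
  | cons l ls ih =>
    intro cur hc
    by_cases hh : pvIsHeader l = true
    · simpa [pvGroup, hh] using hc
    · simp only [pvGroup, hh, Bool.false_eq_true, if_false]
      apply ih
      cases cur with
      | nil =>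
        simp only [List.nil_append, pvNotesHead]
        cases hn : pvIsNotes l with
        | false => rfl
        | true => exact absurd (pvNotes_imp_header l hn) (by simpa using hh)
      | cons c cs => simpa [pvNotesHead] using hc

-- rewrite A's step through B's predicates (same expressions)
lemma pvALoop_cons (l : String) (ls res : List String) (skip : Bool) :
    pvALoop (l :: ls) res skip =
      if pvIsNotes l then pvALoop ls res true
      else
        let skip1 := if skip && pvIsHeader l then false else skip
        pvALoop ls (if skip1 then res else res ++ [l]) skip1 := by
  simp [pvALoop, pvIsNotes, pvIsHeader]

lemma pvMain (ls : List String) : ∀ res,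
    pvALoop ls res false = res ++ pvFl (pvGroup ls []) ∧
    pvALoop ls res true = res ++ pvFl ((pvGroup ls []).tail) := by
  induction ls with
  | nil => intro res; simp [pvALoop, pvGroup, pvFl, pvNotesHead]
  | cons l ls ih =>
    intro res
    obtain ⟨h, t, hg0⟩ : ∃ h t, pvGroup ls [] = h :: t :=
      ⟨_, _, by simpa using pvGroup_shift ls []⟩
    have hg1 : pvGroup ls [l] = (l :: h) :: t := by
      rw [pvGroup_shift ls [l], hg0]; simp
    have hfirst : pvNotesHead h = false := by
      have := pvGroup_first_not_notes ls [] rfl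
      rwa [hg0, List.headI_cons] at this
    by_cases hN : pvIsNotes l = true
    · have hH : pvIsHeader l = true := pvNotes_imp_header l hN
      have hnh : pvNotesHead (l :: h) = true := by simpa [pvNotesHead] using hN
      constructor <;>
        simp [pvALoop_cons, hN, hH, pvGroup, hg0, hg1, pvFl, hnh, (ih res).2]
    · have hnh : pvNotesHead (l :: h) = false := by simpa [pvNotesHead] using hN
      by_cases hH : pvIsHeader l = true
      · constructor <;>
          simp [pvALoop_cons, hN, hH, pvGroup, hg0, hg1, pvFl, hnh, hfirst,
            (ih (res ++ [l])).1]
      · constructor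
        · simp [pvALoop_cons, hN, hH, pvGroup, hg0, hg1, pvFl, hnh, hfirst,
            (ih (res ++ [l])).1]
        · simp [pvALoop_cons, hN, hH, pvGroup, hg0, hg1, (ih res).2]

-- ===== VERDICT (by name: the statement is the Claim_ definition above) =====
theorem strip_dm_notes_section_py_spec : Claim_equal_strip_dm_notes_section_py := by
  intro text _
  unfold Spec_strip_dm_notes_section_py strip_dm_notes_section_py strip_dm_notes_section_py_alt
  simp only [pvFoldl_fl, List.nil_append]
  rw [(pvMain ((PySem.Str.split? text "\n").getD []) []).1]
  simp
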